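-- pv_equiv track=rewrite | github.com/herraChron/GhostFetch | main.py | _gap_report
-- ===== SOURCE A (Python) =====
-- def _gap_report(msg_ids: list[int]) -> str:
--     """Analyse a list of message IDs and return a deleted-message estimate."""
--     if len(msg_ids) < 2:
--         return ""
--     sorted_ids = sorted(msg_ids)
--     gap_count  = sum(1 for a, b in zip(sorted_ids, sorted_ids[1:]) if b - a > 1)
--     gap_msgs   = sum(b - a - 1 for a, b in zip(sorted_ids, sorted_ids[1:]) if b - a > 1)
--     if gap_msgs <= 0:
--         return ""
--     return f"\n~{gap_msgs} likely deleted msg(s) in {gap_count} gap(s)"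
-- ===== SOURCE B (Python) =====
-- def _gap_report(msg_ids: list[int]) -> str:
--     """Analyse a list of message IDs and return a deleted-message estimate."""
--     if len(msg_ids) < 2:
--         return ""
--     ids = set(msg_ids)
--     lo, hi = min(ids), max(ids)
--     gap_msgs = (hi - lo) - (len(ids) - 1)
--     if gap_msgs <= 0:
--         return ""
--     gap_count = sum(v + 1 not in ids for v in ids) - 1
--     return f"\n~{gap_msgs} likely deleted msg(s) in {gap_count} gap(s)"
-- ===== Notes on version B (the rewrite author's own statement) =====
-- stated objective: faster
-- what changed: Replaces the sort plus two adjacent-pair scans with a set: gap_msgs = (max-min)-(distinct-1) and gap_count counted by v+1 membership tests, removing the O(n log n) sort.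
import Mathlib
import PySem

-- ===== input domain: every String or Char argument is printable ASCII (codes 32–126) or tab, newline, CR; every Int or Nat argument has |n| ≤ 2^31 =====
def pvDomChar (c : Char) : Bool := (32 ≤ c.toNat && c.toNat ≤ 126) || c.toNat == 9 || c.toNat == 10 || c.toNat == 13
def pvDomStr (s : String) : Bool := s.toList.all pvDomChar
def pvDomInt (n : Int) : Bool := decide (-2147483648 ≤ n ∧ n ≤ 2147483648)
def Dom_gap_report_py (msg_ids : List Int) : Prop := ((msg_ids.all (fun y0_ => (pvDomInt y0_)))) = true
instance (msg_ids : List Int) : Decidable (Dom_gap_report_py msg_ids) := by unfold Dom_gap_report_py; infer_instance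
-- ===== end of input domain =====

-- B replaces A's sort and adjacent-pair scans by a set with min/max arithmetic; a timing run reports the measured result.

-- ===== PORT A =====
def gap_report_py (msg_ids : List Int) : String :=
  if msg_ids.length < 2 then ""
  else
    let sorted_ids := PySem.List.sorted msg_ids (fun x => x) false
    let pairs := sorted_ids.zip (PySem.List.slice sorted_ids (some 1) none)
    let gap_count : Int :=
      ((pairs.filter (fun p => decide (p.2 - p.1 > 1))).map (fun _ => (1 : Int))).sum
    let gap_msgs : Int :=
      ((pairs.filter (fun p => decide (p.2 - p.1 > 1))).map (fun p => p.2 - p.1 - 1)).sum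
    if gap_msgs ≤ 0 then ""
    else "\n~" ++ PySem.Int.toStr gap_msgs ++ " likely deleted msg(s) in "
          ++ PySem.Int.toStr gap_count ++ " gap(s)"

-- ===== PORT B =====
def gap_report_py_alt (msg_ids : List Int) : String :=
  if msg_ids.length < 2 then ""
  else
    let ids := PySem.Set.ofList msg_ids
    -- ids is nonempty on this branch; `.getD 0` is only a totality guard for min()/max()
    let lo := (PySem.List.min? ids (fun x => x)).getD 0
    let hi := (PySem.List.max? ids (fun x => x)).getD 0
    let gap_msgs : Int := (hi - lo) - (PySem.Set.len ids - 1)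
    if gap_msgs ≤ 0 then ""
    else
      -- sum() of a generator of bools counts the True elements; every v has a membership test,
      -- and hi itself always passes it, hence the trailing "- 1"
      let gap_count : Int :=
        ((ids.map (fun v => if !(PySem.Set.contains ids (v + 1)) then (1 : Int) else 0)).sum) - 1
      "\n~" ++ PySem.Int.toStr gap_msgs ++ " likely deleted msg(s) in "
        ++ PySem.Int.toStr gap_count ++ " gap(s)"

-- ===== PRECONDITION & SPEC =====
def Spec_gap_report_py (msg_ids : List Int) (out : String) : Prop := out = gap_report_py_alt msg_ids
instance (msg_ids : List Int) (out : String) : Decidable (Spec_gap_report_py msg_ids out) := by unfold Spec_gap_report_py; infer_instance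

-- ===== CLAIM (what is proved, stated in full; the proofs are below) =====
def Claim_equal_gap_report_py : Prop := ∀ (msg_ids : List Int), Dom_gap_report_py msg_ids → Spec_gap_report_py msg_ids (gap_report_py msg_ids)

-- ===== LEMMAS AND PROOFS =====

-- A's two generator sums, as structural recursions over the sorted list.
def pvGsum : List Int → Int
  | a :: b :: l => (if b - a > 1 then b - a - 1 else 0) + pvGsum (b :: l)
  | _ => 0

def pvGcnt : List Int → Int
  | a :: b :: l => (if b - a > 1 then 1 else 0) + pvGcnt (b :: l)
  | _ => 0

lemma pvGsum_zip : ∀ t : List Int,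
    (((t.zip (t.drop 1)).filter (fun p => decide (p.2 - p.1 > 1))).map
      (fun p => p.2 - p.1 - 1)).sum = pvGsum t
  | [] => by simp [pvGsum]
  | [_] => by simp [pvGsum]
  | a :: b :: l => by
      have ih := pvGsum_zip (b :: l)
      have hz : (a :: b :: l).zip ((a :: b :: l).drop 1) = (a, b) :: (b :: l).zip ((b :: l).drop 1) := by
        simp
      rw [hz, List.filter_cons,
        show pvGsum (a :: b :: l) = (if b - a > 1 then b - a - 1 else 0) + pvGsum (b :: l) from rfl]
      by_cases h : b - a > 1
      · rw [if_pos (by simpa using h), List.map_cons, List.sum_cons, ih, if_pos h]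
      · rw [if_neg (by simpa using h), ih, if_neg h]; ring

lemma pvGcnt_zip : ∀ t : List Int,
    (((t.zip (t.drop 1)).filter (fun p => decide (p.2 - p.1 > 1))).map
      (fun _ => (1 : Int))).sum = pvGcnt t
  | [] => by simp [pvGcnt]
  | [_] => by simp [pvGcnt]
  | a :: b :: l => by
      have ih := pvGcnt_zip (b :: l)
      have hz : (a :: b :: l).zip ((a :: b :: l).drop 1) = (a, b) :: (b :: l).zip ((b :: l).drop 1) := by
        simp
      rw [hz, List.filter_cons,
        show pvGcnt (a :: b :: l) = (if b - a > 1 then 1 else 0) + pvGcnt (b :: l) from rfl]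
      by_cases h : b - a > 1
      · rw [if_pos (by simpa using h), List.map_cons, List.sum_cons, ih, if_pos h]
      · rw [if_neg (by simpa using h), ih, if_neg h]; ring

-- the last element of a nonempty ≤-sorted list is a member and an upper bound
lemma pvLast_max : ∀ (u : List Int) (b : Int), (b :: u).Pairwise (fun x y => x ≤ y) →
    ((b :: u).getLastD 0 ∈ b :: u) ∧ ∀ x ∈ b :: u, x ≤ (b :: u).getLastD 0
  | [], b, _ => by simp
  | c :: u, b, h => by
      obtain ⟨hb, h2⟩ := List.pairwise_cons.mp h
      obtain ⟨ihm, ihb⟩ := pvLast_max u c h2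
      simp only [List.getLastD_cons] at ihm ihb ⊢
      refine ⟨List.mem_cons_of_mem _ ihm, ?_⟩
      intro x hx
      rcases List.mem_cons.mp hx with rfl | hx
      · exact le_trans (hb _ ihm) (le_refl _)
      · exact ihb x hx

lemma pvGsum_closed : ∀ (u : List Int) (a : Int), (a :: u).Pairwise (fun x y => x ≤ y) →
    pvGsum (a :: u) = (a :: u).getLastD 0 - a - (((a :: u).toFinset.card : Int) - 1)
  | [], a, _ => by simp [pvGsum]
  | b :: l, a, h => by
      obtain ⟨hb, h2⟩ := List.pairwise_cons.mp h
      have hab : a ≤ b := hb b (by simp)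
      have ih := pvGsum_closed l b h2
      by_cases hdup : a = b
      · subst hdup
        have h0 : ¬ (a - a > 1) := by omega
        rw [show pvGsum (a :: a :: l) = (if a - a > 1 then a - a - 1 else 0) + pvGsum (a :: l) from rfl,
          if_neg h0, ih]
        simp [List.toFinset_cons]
      · have hab' : a < b := lt_of_le_of_ne hab hdup
        have hbl : ∀ x ∈ b :: l, b ≤ x := by
          intro x hx
          rcases List.mem_cons.mp hx with rfl | hx
          · exact le_refl _
          · exact (List.pairwise_cons.mp h2).1 x hx
        have hanot : a ∉ (b :: l).toFinset := by
          simp only [List.mem_toFinset]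
          intro hmem
          exact absurd (hbl a hmem) (not_le.mpr hab')
        have hcard : ((a :: b :: l).toFinset.card : Int) = ((b :: l).toFinset.card : Int) + 1 := by
          rw [List.toFinset_cons, Finset.card_insert_of_notMem hanot]
          push_cast; ring
        have hlast : (a :: b :: l).getLastD 0 = (b :: l).getLastD 0 := by
          simp
        rw [show pvGsum (a :: b :: l) = (if b - a > 1 then b - a - 1 else 0) + pvGsum (b :: l) from rfl,
          ih, hcard, hlast]
        simp only [List.getLastD_cons]
        split_ifs with hgap <;> omega

lemma pvGcnt_closed : ∀ (u : List Int) (a : Int), (a :: u).Pairwise (fun x y => x ≤ y) →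
    pvGcnt (a :: u) = (((a :: u).toFinset.filter
        (fun v => v < (a :: u).getLastD 0 ∧ v + 1 ∉ (a :: u).toFinset)).card : Int)
  | [], a, _ => by
      simp [pvGcnt, Finset.filter_singleton]
  | b :: l, a, h => by
      obtain ⟨hb, h2⟩ := List.pairwise_cons.mp h
      have hab : a ≤ b := hb b (by simp)
      have ih := pvGcnt_closed l b h2
      have hbl : ∀ x ∈ b :: l, b ≤ x := by
        intro x hx
        rcases List.mem_cons.mp hx with rfl | hx
        · exact le_refl _
        · exact (List.pairwise_cons.mp h2).1 x hx
      by_cases hdup : a = b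
      · subst hdup
        have h0 : ¬ (a - a > 1) := by omega
        rw [show pvGcnt (a :: a :: l) = (if a - a > 1 then 1 else 0) + pvGcnt (a :: l) from rfl,
          if_neg h0, ih]
        simp only [List.getLastD_cons, List.toFinset_cons, Finset.insert_idem, zero_add]
      · have hab' : a < b := lt_of_le_of_ne hab hdup
        obtain ⟨hlm, hlb⟩ := pvLast_max l b h2
        have hanot : a ∉ (b :: l).toFinset := by
          simp only [List.mem_toFinset]
          intro hmem
          exact absurd (hbl a hmem) (not_le.mpr hab')
        have hlast : (a :: b :: l).getLastD 0 = (b :: l).getLastD 0 := by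
          simp
        -- predicates over the cons'ed finset agree with predicates over the tail finset, on the tail
        have hcongr : Finset.filter
            (fun v => v < (b :: l).getLastD 0 ∧ v + 1 ∉ insert a ((b :: l).toFinset)) ((b :: l).toFinset)
          = Finset.filter
            (fun v => v < (b :: l).getLastD 0 ∧ v + 1 ∉ (b :: l).toFinset) ((b :: l).toFinset) := by
          apply Finset.filter_congr
          intro v hv
          have hbv : b ≤ v := hbl v (List.mem_toFinset.mp hv)
          have hne : v + 1 ≠ a := by omega
          simp only [Finset.mem_insert, not_or]
          tauto
        have hPa : (a < (b :: l).getLastD 0 ∧ a + 1 ∉ insert a ((b :: l).toFinset)) ↔ b - a > 1 := by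
          have hbhi : b ≤ (b :: l).getLastD 0 := (pvLast_max l b h2).2 b (by simp)
          constructor
          · rintro ⟨_, hnot⟩
            by_contra hgap
            have hb1 : a + 1 = b := by omega
            refine hnot (Finset.mem_insert.mpr (Or.inr (List.mem_toFinset.mpr ?_)))
            simp [hb1]
          · intro hgap
            refine ⟨by omega, ?_⟩
            intro hm
            rcases Finset.mem_insert.mp hm with h1 | h1
            · omega
            · have := hbl (a + 1) (List.mem_toFinset.mp h1)
              omega
        rw [show pvGcnt (a :: b :: l) = (if b - a > 1 then 1 else 0) + pvGcnt (b :: l) from rfl, ih, hlast]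
        rw [show (a :: b :: l).toFinset = insert a ((b :: l).toFinset) from List.toFinset_cons]
        rw [Finset.filter_insert, hcongr]
        by_cases hgap : b - a > 1
        · rw [if_pos (hPa.mpr hgap), if_pos hgap,
            Finset.card_insert_of_notMem (fun hm => hanot (Finset.mem_filter.mp hm).1)]
          push_cast; ring
        · rw [if_neg (fun hx => hgap (hPa.mp hx)), if_neg hgap]
          ring

-- the head of the sorted list is min(set(xs)), its last element is max(set(xs))
lemma pvSet_toFinset (xs : List Int) : (PySem.Set.ofList xs).toFinset = xs.toFinset := by
  apply Finset.ext
  intro x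
  simp [List.mem_toFinset, PySem.Set.mem_ofList]

theorem pvMain (msg_ids : List Int) : gap_report_py msg_ids = gap_report_py_alt msg_ids := by
  by_cases hlen : msg_ids.length < 2
  · simp [gap_report_py, gap_report_py_alt, hlen]
  · have hne : msg_ids ≠ [] := by
      intro h; rw [h] at hlen; simp at hlen
    have htne : PySem.List.sorted msg_ids (fun x => x) false ≠ [] := by
      rw [Ne, PySem.List.sorted_eq_nil_iff]; exact hne
    obtain ⟨a, u, hau⟩ := List.exists_cons_of_ne_nil htne
    have hperm : (PySem.List.sorted msg_ids (fun x => x) false).Perm msg_ids :=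
      PySem.List.sorted_perm msg_ids (fun x => x) false
    have hpw : (a :: u).Pairwise (fun x y => x ≤ y) := by
      have := PySem.List.sorted_pairwise msg_ids (fun x => x)
      rw [hau] at this; exact this
    have hmem_t : ∀ x, x ∈ a :: u ↔ x ∈ msg_ids := by
      intro x; rw [← hau]; exact hperm.mem_iff
    have hd_mem : ∀ x, x ∈ PySem.Set.ofList msg_ids ↔ x ∈ msg_ids := fun x =>
      PySem.Set.mem_ofList msg_ids x
    have hdne : PySem.Set.ofList msg_ids ≠ [] := by
      intro h
      obtain ⟨y, hy⟩ := List.exists_mem_of_ne_nil _ hne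
      exact absurd ((hd_mem y).mpr hy) (by simp [h])
    -- min
    obtain ⟨lo, hlo⟩ : ∃ m, PySem.List.min? (PySem.Set.ofList msg_ids) (fun x => x) = some m := by
      cases hm : PySem.List.min? (PySem.Set.ofList msg_ids) (fun x => x) with
      | none => exact absurd ((PySem.List.min?_eq_none_iff _ _).mp hm) hdne
      | some m => exact ⟨m, rfl⟩
    obtain ⟨hi, hhi⟩ : ∃ m, PySem.List.max? (PySem.Set.ofList msg_ids) (fun x => x) = some m := by
      cases hm : PySem.List.max? (PySem.Set.ofList msg_ids) (fun x => x) with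
      | none => exact absurd ((PySem.List.max?_eq_none_iff _ _).mp hm) hdne
      | some m => exact ⟨m, rfl⟩
    have hhead_le : ∀ y ∈ msg_ids, a ≤ y := by
      have := PySem.List.key_head_sorted_le msg_ids (fun x => x) hau
      simpa using this
    have hlo_eq : lo = a := by
      have h1 : lo ≤ a := PySem.List.min?_isMin hlo a ((hd_mem a).mpr ((hmem_t a).mp (by simp)))
      have h2 : a ≤ lo := hhead_le lo ((hd_mem lo).mp (PySem.List.min?_mem hlo))
      omega
    obtain ⟨hlastm, hlastb⟩ := pvLast_max u a hpw
    have hhi_eq : hi = (a :: u).getLastD 0 := by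
      have h1 : (a :: u).getLastD 0 ≤ hi :=
        PySem.List.max?_isMax hhi _ ((hd_mem _).mpr ((hmem_t _).mp hlastm))
      have h2 : hi ≤ (a :: u).getLastD 0 :=
        hlastb hi ((hmem_t hi).mpr ((hd_mem hi).mp (PySem.List.max?_mem hhi)))
      omega
    have hnodup : (PySem.Set.ofList msg_ids).Nodup := PySem.Set.nodup_ofList msg_ids
    have htf : (a :: u).toFinset = msg_ids.toFinset := by
      apply Finset.ext; intro x; simp only [List.mem_toFinset]; exact hmem_t x
    have hdlen : PySem.Set.len (PySem.Set.ofList msg_ids)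
        = (((a :: u).toFinset.card : Int)) := by
      rw [PySem.Set.len, htf, ← pvSet_toFinset msg_ids,
        List.toFinset_card_of_nodup hnodup]
    -- the two gap_msgs values agree
    have hslice : PySem.List.slice (PySem.List.sorted msg_ids (fun x => x) false) (some 1) none
        = (PySem.List.sorted msg_ids (fun x => x) false).drop 1 := by
      simpa using PySem.List.slice_from (PySem.List.sorted msg_ids (fun x => x) false)
        (a := 1) (by norm_num)
    have hgm : ((((PySem.List.sorted msg_ids (fun x => x) false).zip
          (PySem.List.slice (PySem.List.sorted msg_ids (fun x => x) false) (some 1) none)).filter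
            (fun p => decide (p.2 - p.1 > 1))).map (fun p => p.2 - p.1 - 1)).sum
        = (hi - lo) - (PySem.Set.len (PySem.Set.ofList msg_ids) - 1) := by
      rw [hslice, pvGsum_zip, hau, pvGsum_closed u a hpw, hlo_eq, hhi_eq, hdlen]
    -- the two gap_count values agree
    have hqcongr : ∀ v ∈ (a :: u).toFinset,
        ((fun w => !(PySem.Set.contains (PySem.Set.ofList msg_ids) (w + 1))) v = true)
        ↔ (v + 1 ∉ (a :: u).toFinset) := by
      intro v _
      simp only [Bool.not_eq_true', PySem.Set.contains, List.contains_eq_mem,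
        decide_eq_false_iff_not, hd_mem, List.mem_toFinset, hmem_t]
    have hhiT : (a :: u).getLastD 0 ∈ (a :: u).toFinset := List.mem_toFinset.mpr hlastm
    -- the elements whose successor is absent are exactly the gap left-ends plus the maximum
    have hsplit : Finset.filter (fun v => v + 1 ∉ (a :: u).toFinset) ((a :: u).toFinset)
        = insert ((a :: u).getLastD 0)
            (Finset.filter (fun v => v < (a :: u).getLastD 0 ∧ v + 1 ∉ (a :: u).toFinset)
              ((a :: u).toFinset)) := by
      apply Finset.ext
      intro x
      simp only [Finset.mem_filter, Finset.mem_insert]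
      constructor
      · rintro ⟨hx, hnx⟩
        by_cases hxe : x = (a :: u).getLastD 0
        · exact Or.inl hxe
        · exact Or.inr ⟨hx, lt_of_le_of_ne (hlastb x (List.mem_toFinset.mp hx)) hxe, hnx⟩
      · rintro (rfl | ⟨hx, _, hnx⟩)
        · refine ⟨hhiT, fun hm => ?_⟩
          have := hlastb _ (List.mem_toFinset.mp hm)
          omega
        · exact ⟨hx, hnx⟩
    have hnot : (a :: u).getLastD 0 ∉ Finset.filter
        (fun v => v < (a :: u).getLastD 0 ∧ v + 1 ∉ (a :: u).toFinset) ((a :: u).toFinset) := by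
      intro hm
      exact absurd (Finset.mem_filter.mp hm).2.1 (lt_irrefl _)
    have hgc : (((PySem.Set.ofList msg_ids).map
          (fun v => if !(PySem.Set.contains (PySem.Set.ofList msg_ids) (v + 1)) then (1 : Int) else 0)).sum) - 1
        = ((((PySem.List.sorted msg_ids (fun x => x) false).zip
          (PySem.List.slice (PySem.List.sorted msg_ids (fun x => x) false) (some 1) none)).filter
            (fun p => decide (p.2 - p.1 > 1))).map (fun _ => (1 : Int))).sum := by
      rw [hslice, pvGcnt_zip, hau, pvGcnt_closed u a hpw, PySem.List.sum_map_ite_one_zero]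
      have hcnt : (PySem.Set.ofList msg_ids).countP
            (fun v => !(PySem.Set.contains (PySem.Set.ofList msg_ids) (v + 1)))
          = ((PySem.Set.ofList msg_ids).filter
            (fun v => !(PySem.Set.contains (PySem.Set.ofList msg_ids) (v + 1)))).length :=
        List.countP_eq_length_filter
      have hfn : ((PySem.Set.ofList msg_ids).filter
            (fun v => !(PySem.Set.contains (PySem.Set.ofList msg_ids) (v + 1)))).toFinset.card
          = ((PySem.Set.ofList msg_ids).filter
            (fun v => !(PySem.Set.contains (PySem.Set.ofList msg_ids) (v + 1)))).length :=
        List.toFinset_card_of_nodup (List.Nodup.filter _ hnodup)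
      rw [hcnt, ← hfn, List.toFinset_filter, pvSet_toFinset, ← htf]
      rw [Finset.filter_congr (fun x hx => hqcongr x hx)]
      rw [hsplit, Finset.card_insert_of_notMem hnot]
      push_cast
      ring
    -- assemble
    simp only [gap_report_py, gap_report_py_alt, if_neg hlen, hlo, hhi, Option.getD_some]
    rw [hgm, hgc]

-- ===== VERDICT (by name: the statement is the Claim_ definition above) =====
theorem gap_report_py_spec : Claim_equal_gap_report_py := by
  intro msg_ids _
  exact pvMain msg_ids
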